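-- pv_equiv track=rewrite | github.com/techiemohitjangra/advent_of_code_2023 | day1/python/solve.py | part2
-- ===== SOURCE A (Python) =====
-- def part2(line: str) -> int:
--     nums = {'one': 1, 'two': 2, 'three': 3, 'four': 4,
--             'five': 5, 'six': 6, 'seven': 7, 'eight': 8, 'nine': 9}
--
--     first: str = ''
--     last: str = ''
--     first_word_index: int = len(line)
--     last_word_index: int = -1
--     first_word: str = ''
--     last_word: str = ''
--     first_digit_index: int = len(line)
--     last_digit_index: int = -1
--
--     for index, char in enumerate(line):
--         if char.isdigit():
--             first_digit_index = index
--             break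
--
--     for index, char in enumerate(line):
--         if char.isdigit():
--             last_digit_index = index
--
--     for index in range(len(line)):
--         if line[index:index+3] in nums.keys():
--             first_word_index = index
--             first_word = line[index: index+3]
--             break
--         if line[index:index+4] in nums.keys():
--             first_word_index = index
--             first_word = line[index: index+4]
--             break
--         if line[index:index+5] in nums.keys():
--             first_word_index = index
--             first_word = line[index: index+5]
--             break
--
--     for index in range(len(line[:-2])):
--         if line[index:index+3] in nums.keys():
--             last_word_index = index
--             last_word = line[index: index+3]
--         if line[index:index+4] in nums.keys():
--             last_word_index = index
--             last_word = line[index: index+4]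
--         if line[index:index+5] in nums.keys():
--             last_word_index = index
--             last_word = line[index: index+5]
--
--     if (first_word_index < first_digit_index):
--         first = str(nums[first_word])
--     else:
--         first = line[first_digit_index]
--
--     if (last_word_index > last_digit_index):
--         last = str(nums[last_word])
--     else:
--         last = line[last_digit_index]
--
--     return int(str(first) + str(last))
-- ===== SOURCE B (Python) =====
-- def part2(line: str) -> int:
--     nums = {'one': 1, 'two': 2, 'three': 3, 'four': 4,
--             'five': 5, 'six': 6, 'seven': 7, 'eight': 8, 'nine': 9}
--     values = []
--     for i, ch in enumerate(line):
--         if ch.isdigit():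
--             values.append(int(ch))
--         else:
--             for k in (3, 4, 5):
--                 w = line[i:i + k]
--                 if w in nums:
--                     values.append(nums[w])
--                     break
--     return values[0] * 10 + values[-1]
-- ===== Notes on version B (the rewrite author's own statement) =====
-- stated objective: simpler
-- what changed: B replaces A's four separate scans (first/last digit, first/last word) and its index tie-breaks by a single left-to-right positional pass that collects every digit or spelled-word value into one list and returns 10*values[0] + values[-1].
import Mathlib
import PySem

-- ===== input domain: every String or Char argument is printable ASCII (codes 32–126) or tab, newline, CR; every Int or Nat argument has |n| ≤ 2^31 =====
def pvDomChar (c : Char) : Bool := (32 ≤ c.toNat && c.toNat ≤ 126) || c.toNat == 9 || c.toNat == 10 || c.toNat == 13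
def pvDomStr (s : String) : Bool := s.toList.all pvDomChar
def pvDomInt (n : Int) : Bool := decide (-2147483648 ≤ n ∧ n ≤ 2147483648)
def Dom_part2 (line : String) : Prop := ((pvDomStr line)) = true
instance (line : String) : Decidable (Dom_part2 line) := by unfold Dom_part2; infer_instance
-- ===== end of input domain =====

-- B does ONE left-to-right positional pass collecting every digit/word value; A makes four
-- separate scans and an index tie-break.  Objective: simpler.  Return value only; no mutation.

-- ===== PORT A =====
-- the dict literal 'nums' shared by both Pythons
def pvNums : PySem.Dict String Int :=
  ((((((((PySem.Dict.empty.insert "one" 1).insert "two" 2).insert "three" 3).insert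
      "four" 4).insert "five" 5).insert "six" 6).insert "seven" 7).insert "eight" 8).insert "nine" 9

-- 's in nums.keys()'
def pvInNums (s : String) : Bool := pvNums.keys.contains s

-- 'line[i:i+k]'
def pvSliceA (line : String) (i k : Int) : String := PySem.Str.slice line (some i) (some (i + k))

-- first loop: first digit index, with break
def pvFdLoop : List (Int × Char) → Int → Int
  | [], acc => acc
  | (i, c) :: rest, acc => if PySem.Chars.isdigit c then i else pvFdLoop rest acc

-- second loop: last digit index (no break)
def pvLdLoop : List (Int × Char) → Int → Int
  | [], acc => acc
  | (i, c) :: rest, acc => pvLdLoop rest (if PySem.Chars.isdigit c then i else acc)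

-- third loop: first word (three checks, each with break)
def pvFwLoop (line : String) : List Int → Int × String → Int × String
  | [], acc => acc
  | i :: rest, acc =>
    if pvInNums (pvSliceA line i 3) then (i, pvSliceA line i 3)
    else if pvInNums (pvSliceA line i 4) then (i, pvSliceA line i 4)
    else if pvInNums (pvSliceA line i 5) then (i, pvSliceA line i 5)
    else pvFwLoop line rest acc

-- fourth loop body: three independent ifs, each overwriting (index, word)
def pvLwStep (line : String) (i : Int) (acc : Int × String) : Int × String :=
  let acc1 := if pvInNums (pvSliceA line i 3) then (i, pvSliceA line i 3) else acc
  let acc2 := if pvInNums (pvSliceA line i 4) then (i, pvSliceA line i 4) else acc1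
  if pvInNums (pvSliceA line i 5) then (i, pvSliceA line i 5) else acc2

def pvLwLoop (line : String) : List Int → Int × String → Int × String
  | [], acc => acc
  | i :: rest, acc => pvLwLoop line rest (pvLwStep line i acc)

def part2 (line : String) : Int :=
  let n : Int := PySem.Str.len line
  let fdi := pvFdLoop (PySem.List.enumerate line.toList 0) n
  let ldi := pvLdLoop (PySem.List.enumerate line.toList 0) (-1)
  let fw := pvFwLoop line (PySem.List.pyRange 0 n 1) (n, "")
  let lw := pvLwLoop line
      (PySem.List.pyRange 0 (PySem.Str.len (PySem.Str.slice line none (some (-2)))) 1) (-1, "")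
  -- first/last are the one-digit strings A builds; [] marks the IndexError case (outside Pre_)
  let first : List Char :=
    if fw.1 < fdi then PySem.Int.toChars ((pvNums.get? fw.2).getD 0)
    else match PySem.Str.pyGet? line fdi with | some c => [c] | none => []
  let last : List Char :=
    if lw.1 > ldi then PySem.Int.toChars ((pvNums.get? lw.2).getD 0)
    else match PySem.Str.pyGet? line ldi with | some c => [c] | none => []
  (PySem.Int.ofChars? (first ++ last)).getD 0

-- ===== PORT B =====
-- 'for k in (3, 4, 5): w = line[i:i+k]; if w in nums: ... break'
def pvTryWords (line : String) (i : Int) : List Int → Option Int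
  | [] => none
  | k :: rest =>
    let w := PySem.Str.slice line (some i) (some (i + k))
    if pvInNums w then some ((pvNums.get? w).getD 0) else pvTryWords line i rest

-- the single pass of B, appending to 'values'
def pvValsLoop (line : String) : List (Int × Char) → List Int → List Int
  | [], acc => acc
  | (i, c) :: rest, acc =>
    pvValsLoop line rest
      (if PySem.Chars.isdigit c then acc ++ [(PySem.Int.ofChars? [c]).getD 0]
       else match pvTryWords line i [3, 4, 5] with
            | some v => acc ++ [v]
            | none => acc)

def part2_alt (line : String) : Int :=
  let values := pvValsLoop line (PySem.List.enumerate line.toList 0) []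
  (PySem.List.pyGet? values 0).getD 0 * 10 + (PySem.List.pyGet? values (-1)).getD 0

-- ===== PRECONDITION & SPEC =====
-- Pre_ excludes exactly the inputs with no digit and no spelled digit word, where the Python
-- A raises IndexError (and B raises IndexError too).
def Pre_part2 (line : String) : Prop :=
  line.toList.any PySem.Chars.isdigit = true ∨
  ∃ w ∈ (["one", "two", "three", "four", "five", "six", "seven", "eight", "nine"] : List String),
      PySem.Str.isIn w line = true

instance (line : String) : Decidable (Pre_part2 line) := by unfold Pre_part2; infer_instance

def pvWitness_part2 : String := "xtwone3x"

def Spec_part2 (line : String) (out : Int) : Prop := out = part2_alt line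
instance (line : String) (out : Int) : Decidable (Spec_part2 line out) := by
  unfold Spec_part2; infer_instance

-- ===== CLAIM (what is proved, stated in full; the proofs are below) =====
def Claim_equal_part2 : Prop :=
  ∀ (line : String), Dom_part2 line → Pre_part2 line → Spec_part2 line (part2 line)

-- ===== LEMMAS AND PROOFS =====

-- proof layer: the word match at Int index i, in A's 3/4/5 check order
def pvAW (line : String) (i : Int) : Option String :=
  if pvInNums (pvSliceA line i 3) then some (pvSliceA line i 3)
  else if pvInNums (pvSliceA line i 4) then some (pvSliceA line i 4)
  else if pvInNums (pvSliceA line i 5) then some (pvSliceA line i 5)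
  else none

-- digit test at a Nat index
def pvDP (line : String) (k : Nat) : Bool :=
  match line.toList[k]? with | some c => PySem.Chars.isdigit c | none => false

-- word match test at a Nat index
def pvWP (line : String) (k : Nat) : Bool := (pvAW line (↑k)).isSome

-- the value contributed at index k (a digit and a word never share an index)
def pvM (line : String) (k : Nat) : Option Int :=
  match line.toList[k]? with
  | some c =>
    if PySem.Chars.isdigit c then some ((PySem.Int.ofChars? [c]).getD 0)
    else (pvAW line (↑k)).map (fun w => (pvNums.get? w).getD 0)
  | none => none

theorem pv_find?_congr {α : Type} {p q : α → Bool} {l : List α}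
    (h : ∀ x ∈ l, p x = q x) : l.find? p = l.find? q := by
  induction l with
  | nil => rfl
  | cons a t ih =>
    simp only [List.find?_cons, h a (List.mem_cons_self)]
    cases q a <;> simp_all

theorem pv_digit_cases (c : Char) (h : PySem.Chars.isdigit c = true) :
    c = '0' ∨ c = '1' ∨ c = '2' ∨ c = '3' ∨ c = '4' ∨ c = '5' ∨ c = '6' ∨ c = '7' ∨ c = '8' ∨ c = '9' := by
  simp [PySem.Chars.isdigit, Char.le_def, UInt32.le_iff_toNat_le] at h
  obtain ⟨h1, h2⟩ := h
  have ext : ∀ d : Char, c.val.toNat = d.val.toNat → c = d := by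
    intro d hd; apply Char.ext; exact UInt32.toNat_inj.mp hd
  have a1 : ('0').val.toNat = 48 := rfl
  have a2 : ('9').val.toNat = 57 := rfl
  have e0 : c.toNat = c.val.toNat := rfl
  have hv : c.val.toNat = 48 ∨ c.val.toNat = 49 ∨ c.val.toNat = 50 ∨ c.val.toNat = 51 ∨
      c.val.toNat = 52 ∨ c.val.toNat = 53 ∨ c.val.toNat = 54 ∨ c.val.toNat = 55 ∨
      c.val.toNat = 56 ∨ c.val.toNat = 57 := by omega
  rcases hv with h|h|h|h|h|h|h|h|h|h
  · exact Or.inl (ext '0' h)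
  · exact Or.inr (Or.inl (ext '1' h))
  · exact Or.inr (Or.inr (Or.inl (ext '2' h)))
  · exact Or.inr (Or.inr (Or.inr (Or.inl (ext '3' h))))
  · exact Or.inr (Or.inr (Or.inr (Or.inr (Or.inl (ext '4' h)))))
  · exact Or.inr (Or.inr (Or.inr (Or.inr (Or.inr (Or.inl (ext '5' h))))))
  · exact Or.inr (Or.inr (Or.inr (Or.inr (Or.inr (Or.inr (Or.inl (ext '6' h)))))))
  · exact Or.inr (Or.inr (Or.inr (Or.inr (Or.inr (Or.inr (Or.inr (Or.inl (ext '7' h))))))))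
  · exact Or.inr (Or.inr (Or.inr (Or.inr (Or.inr (Or.inr (Or.inr (Or.inr (Or.inl (ext '8' h)))))))))
  · exact Or.inr (Or.inr (Or.inr (Or.inr (Or.inr (Or.inr (Or.inr (Or.inr (Or.inr (ext '9' h)))))))))

theorem pv_inNums_iff (s : String) :
    pvInNums s = true ↔ (s = "one" ∨ s = "two" ∨ s = "three" ∨ s = "four" ∨ s = "five" ∨
      s = "six" ∨ s = "seven" ∨ s = "eight" ∨ s = "nine") := by
  show (["one","two","three","four","five","six","seven","eight","nine"] : List String).contains s = true ↔ _
  simp [List.contains_eq_mem]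

theorem pv_slice_toList (line : String) (k m : Nat) :
    (pvSliceA line (↑k) (↑m)).toList = (line.toList.drop k).take m := by
  simp [pvSliceA, PySem.Str.toList_slice]
  rw [PySem.List.slice_natCast_add]

theorem pv_seg3 (line : String) (k : Nat) :
    (pvSliceA line (↑k) 3).toList = (line.toList.drop k).take 3 := by
  have := pv_slice_toList line k 3; push_cast at this; exact this

theorem pv_seg4 (line : String) (k : Nat) :
    (pvSliceA line (↑k) 4).toList = (line.toList.drop k).take 4 := by
  have := pv_slice_toList line k 4; push_cast at this; exact this

theorem pv_seg5 (line : String) (k : Nat) :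
    (pvSliceA line (↑k) 5).toList = (line.toList.drop k).take 5 := by
  have := pv_slice_toList line k 5; push_cast at this; exact this

theorem pv_excl34 (line : String) (k : Nat) (h3 : pvInNums (pvSliceA line (↑k) 3) = true)
    (h4 : pvInNums (pvSliceA line (↑k) 4) = true) : pvSliceA line (↑k) 4 = pvSliceA line (↑k) 3 := by
  have t : (pvSliceA line (↑k) 3).toList = ((pvSliceA line (↑k) 4).toList).take 3 := by
    rw [pv_seg3, pv_seg4, List.take_take]; norm_num
  rw [pv_inNums_iff] at h3 h4
  apply String.toList_inj.mp
  rcases h3 with h|h|h|h|h|h|h|h|h <;> rcases h4 with g|g|g|g|g|g|g|g|g <;>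
    rw [h, g] at t ⊢ <;> revert t <;> decide

theorem pv_excl35 (line : String) (k : Nat) (h3 : pvInNums (pvSliceA line (↑k) 3) = true)
    (h5 : pvInNums (pvSliceA line (↑k) 5) = true) : pvSliceA line (↑k) 5 = pvSliceA line (↑k) 3 := by
  have t : (pvSliceA line (↑k) 3).toList = ((pvSliceA line (↑k) 5).toList).take 3 := by
    rw [pv_seg3, pv_seg5, List.take_take]; norm_num
  rw [pv_inNums_iff] at h3 h5
  apply String.toList_inj.mp
  rcases h3 with h|h|h|h|h|h|h|h|h <;> rcases h5 with g|g|g|g|g|g|g|g|g <;>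
    rw [h, g] at t ⊢ <;> revert t <;> decide

theorem pv_excl45 (line : String) (k : Nat) (h4 : pvInNums (pvSliceA line (↑k) 4) = true)
    (h5 : pvInNums (pvSliceA line (↑k) 5) = true) : pvSliceA line (↑k) 5 = pvSliceA line (↑k) 4 := by
  have t : (pvSliceA line (↑k) 4).toList = ((pvSliceA line (↑k) 5).toList).take 4 := by
    rw [pv_seg4, pv_seg5, List.take_take]; norm_num
  rw [pv_inNums_iff] at h4 h5
  apply String.toList_inj.mp
  rcases h4 with h|h|h|h|h|h|h|h|h <;> rcases h5 with g|g|g|g|g|g|g|g|g <;>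
    rw [h, g] at t ⊢ <;> revert t <;> decide

theorem pvFdLoop_eq (l : List (Int × Char)) (d : Int) :
    pvFdLoop l d = match l.find? (fun p => PySem.Chars.isdigit p.2) with
      | some p => p.1 | none => d := by
  induction l generalizing d with
  | nil => rfl
  | cons p t ih =>
    obtain ⟨i, c⟩ := p
    simp only [pvFdLoop, List.find?_cons]
    by_cases h : PySem.Chars.isdigit c <;> simp [h, ih]

theorem pvLdLoop_eq (l : List (Int × Char)) (d : Int) :
    pvLdLoop l d = match l.reverse.find? (fun p => PySem.Chars.isdigit p.2) with
      | some p => p.1 | none => d := by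
  induction l generalizing d with
  | nil => rfl
  | cons p t ih =>
    obtain ⟨i, c⟩ := p
    simp only [pvLdLoop, List.reverse_cons, List.find?_append, ih]
    by_cases h : PySem.Chars.isdigit c <;>
      cases hf : t.reverse.find? (fun p => PySem.Chars.isdigit p.2) <;>
        simp [h, Option.or]

theorem pvLwStep_eq (line : String) (k : Nat) (acc : Int × String) :
    pvLwStep line (↑k) acc = match pvAW line (↑k) with
      | some w => ((k : Int), w) | none => acc := by
  unfold pvLwStep pvAW
  by_cases h3 : pvInNums (pvSliceA line (↑k) 3) = true <;>
    by_cases h4 : pvInNums (pvSliceA line (↑k) 4) = true <;>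
      by_cases h5 : pvInNums (pvSliceA line (↑k) 5) = true
  all_goals try simp [h3, h4, h5]
  · rw [pv_excl45 line k h4 h5, pv_excl34 line k h3 h4]
  · rw [pv_excl34 line k h3 h4]
  · rw [pv_excl35 line k h3 h5]
  · rw [pv_excl45 line k h4 h5]

theorem pvLwStep_eq' (line : String) (i : Int) (hi : 0 ≤ i) (acc : Int × String) :
    pvLwStep line i acc = match pvAW line i with
      | some w => (i, w) | none => acc := by
  obtain ⟨k, rfl⟩ : ∃ k : Nat, i = (k : Int) := ⟨i.toNat, (Int.toNat_of_nonneg hi).symm⟩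
  exact pvLwStep_eq line k acc

theorem pvFwLoop_eq (line : String) (l : List Int) (acc : Int × String) :
    pvFwLoop line l acc = match l.find? (fun i => (pvAW line i).isSome) with
      | some i => (i, (pvAW line i).getD "") | none => acc := by
  induction l generalizing acc with
  | nil => rfl
  | cons i rest ih =>
    simp only [pvFwLoop, List.find?_cons]
    unfold pvAW
    by_cases h3 : pvInNums (pvSliceA line i 3) = true
    · simp [h3]
    · by_cases h4 : pvInNums (pvSliceA line i 4) = true
      · simp [h3, h4]
      · by_cases h5 : pvInNums (pvSliceA line i 5) = true
        · simp [h3, h4, h5]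
        · simpa [h3, h4, h5] using ih acc

theorem pvLwLoop_eq (line : String) (l : List Int)
    (hl : ∀ i ∈ l, 0 ≤ i) (acc : Int × String) :
    pvLwLoop line l acc = match l.reverse.find? (fun i => (pvAW line i).isSome) with
      | some i => (i, (pvAW line i).getD "") | none => acc := by
  induction l generalizing acc with
  | nil => rfl
  | cons i rest ih =>
    simp only [pvLwLoop, List.reverse_cons, List.find?_append]
    rw [ih (fun j hj => hl j (List.mem_cons_of_mem i hj))]
    rw [pvLwStep_eq' line i (hl i List.mem_cons_self) acc]
    cases hf : rest.reverse.find? (fun j => (pvAW line j).isSome) <;>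
      cases hw : pvAW line i <;> simp [hw, Option.or]

theorem pvTryWords_eq (line : String) (i : Int) :
    pvTryWords line i [3, 4, 5] = (pvAW line i).map (fun w => (pvNums.get? w).getD 0) := by
  show pvTryWords line i [3,4,5] = _
  unfold pvTryWords pvAW
  by_cases h3 : pvInNums (pvSliceA line i 3) = true <;>
    by_cases h4 : pvInNums (pvSliceA line i 4) = true <;>
      by_cases h5 : pvInNums (pvSliceA line i 5) = true <;>
        (simp only [pvSliceA] at h3 h4 h5 ⊢; simp [pvTryWords, h3, h4, h5])

theorem pvValsLoop_eq (line : String) (m j : Nat) (acc : List Int)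
    (hm : line.toList.length - j = m) :
    pvValsLoop line (PySem.List.enumerate (line.toList.drop j) (↑j)) acc =
      acc ++ (List.range' j m).filterMap (pvM line) := by
  induction m generalizing j acc with
  | zero =>
    have hd : line.toList.drop j = [] := List.drop_eq_nil_of_le (by omega)
    simp [hd, PySem.List.enumerate_nil, pvValsLoop]
  | succ m ih =>
    have hjlt : j < line.toList.length := by omega
    rw [List.drop_eq_getElem_cons hjlt, PySem.List.enumerate_cons]
    simp only [pvValsLoop]
    have hget : line.toList[j]? = some (line.toList[j]) := List.getElem?_eq_getElem hjlt
    have hcast : (j : Int) + 1 = ((j + 1 : Nat) : Int) := by push_cast; ring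
    rw [List.range'_succ]
    by_cases hd : PySem.Chars.isdigit (line.toList[j]) = true
    · rw [if_pos hd, hcast, ih (j+1) _ (by omega)]
      have hm : pvM line j = some ((PySem.Int.ofChars? [line.toList[j]]).getD 0) := by
        simp [pvM, hget, hd]
      simp [hm]
    · rw [if_neg hd, pvTryWords_eq]
      have hm : pvM line j = (pvAW line ↑j).map (fun w => (pvNums.get? w).getD 0) := by
        simp [pvM, hget, hd]
      cases hw : pvAW line (↑j) <;> rw [hw] at hm <;> simp only [Option.map] at hm <;>
        · rw [hcast, ih (j+1) _ (by omega)]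
          simp [hm]

theorem pv_inNums_len (s : String) (h : pvInNums s = true) : 3 ≤ s.toList.length := by
  rw [pv_inNums_iff] at h
  rcases h with h|h|h|h|h|h|h|h|h <;> subst h <;> decide

theorem pv_first_char (line : String) (k m : Nat) (c0 : Char) (t : List Char)
    (h : (line.toList.drop k).take m = c0 :: t) : line.toList[k]? = some c0 := by
  rw [← List.head?_drop]
  cases hd : line.toList.drop k with
  | nil => rw [hd] at h; simp at h
  | cons a l =>
    rw [hd] at h
    cases m with
    | zero => simp at h
    | succ m => simp only [List.take_succ_cons] at h; injection h with h1 _; rw [h1]; rfl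

theorem pv_aw_inNums (line : String) (i : Int) (w : String) (h : pvAW line i = some w) :
    pvInNums w = true := by
  unfold pvAW at h
  split_ifs at h with h3 h4 h5 <;> injection h with h <;> subst h <;> assumption

theorem pv_aw_none (line : String) (k : Nat) (h : line.toList.length < k + 3) :
    pvAW line (↑k) = none := by
  unfold pvAW
  have hlen : ∀ m : Nat, ((line.toList.drop k).take m).length ≤ 2 := by
    intro m
    rw [List.length_take, List.length_drop]
    omega
  split_ifs with h3 h4 h5
  · have := pv_inNums_len _ h3; rw [pv_seg3] at this
    have := hlen 3; omega
  · have := pv_inNums_len _ h4; rw [pv_seg4] at this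
    have := hlen 4; omega
  · have := pv_inNums_len _ h5; rw [pv_seg5] at this
    have := hlen 5; omega
  · rfl

theorem pv_wp_lt (line : String) (k : Nat) (h : pvWP line k = true) :
    k + 3 ≤ line.toList.length := by
  by_contra hc
  unfold pvWP at h
  rw [pv_aw_none line k (by omega)] at h
  simp at h

theorem pv_excl (line : String) (k : Nat) (h : pvDP line k = true) :
    pvAW line (↑k) = none := by
  have hc : ∀ (m : Nat) (s : String), (pvSliceA line (↑k) (↑m)).toList = s.toList →
      pvInNums s = true → pvDP line k = false := by
    intro m s hseg hs
    rw [pv_slice_toList] at hseg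
    rw [pv_inNums_iff] at hs
    unfold pvDP
    rcases hs with h|h|h|h|h|h|h|h|h <;> subst h <;>
      rw [pv_first_char line k m _ _ (by rw [hseg]; rfl)] <;> decide
  unfold pvAW
  split_ifs with h3 h4 h5
  · exfalso
    have := hc 3 _ (by push_cast; rfl) h3; rw [h] at this; exact Bool.noConfusion this
  · exfalso
    have := hc 4 _ (by push_cast; rfl) h4; rw [h] at this; exact Bool.noConfusion this
  · exfalso
    have := hc 5 _ (by push_cast; rfl) h5; rw [h] at this; exact Bool.noConfusion this
  · rfl

theorem pv_wp_char (line : String) (k : Nat) (h : pvWP line k = true) :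
    ∃ c, line.toList[k]? = some c ∧ PySem.Chars.isdigit c = false := by
  have hlt := pv_wp_lt line k h
  refine ⟨line.toList[k], List.getElem?_eq_getElem (by omega), ?_⟩
  by_contra hd
  simp only [Bool.not_eq_false] at hd
  have hdp : pvDP line k = true := by
    unfold pvDP; rw [List.getElem?_eq_getElem (by omega : k < line.toList.length)]; exact hd
  unfold pvWP at h
  rw [pv_excl line k hdp] at h
  simp at h

theorem pv_m_bounds (line : String) (k : Nat) (v : Int) (h : pvM line k = some v) :
    0 ≤ v ∧ v ≤ 9 := by
  unfold pvM at h
  cases hg : line.toList[k]? with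
  | none => simp [hg] at h
  | some c =>
    simp only [hg] at h
    by_cases hd : PySem.Chars.isdigit c = true
    · rw [if_pos hd] at h
      injection h with h; subst h
      rcases pv_digit_cases c hd with h|h|h|h|h|h|h|h|h|h <;> subst h <;> exact ⟨by decide, by decide⟩
    · rw [if_neg hd] at h
      cases hw : pvAW line (↑k) with
      | none => simp [hw] at h
      | some w =>
        simp only [hw, Option.map_some] at h
        injection h with h; subst h
        have := pv_aw_inNums line (↑k) w hw
        rw [pv_inNums_iff] at this
        rcases this with h|h|h|h|h|h|h|h|h <;> subst h <;> exact ⟨by decide, by decide⟩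

theorem pv_head (line : String) (l : List Nat) (hl : l.Pairwise (· < ·)) :
    (l.filterMap (pvM line)).head? =
      match l.find? (pvDP line), l.find? (pvWP line) with
      | none, none => none
      | some d, none => pvM line d
      | none, some w => pvM line w
      | some d, some w => if w < d then pvM line w else pvM line d := by
  induction l with
  | nil => rfl
  | cons i t ih =>
    have hfor := (List.pairwise_cons.mp hl).1
    have hpw := (List.pairwise_cons.mp hl).2
    by_cases hd : pvDP line i = true
    · have hwf : pvWP line i = false := by
        unfold pvWP; rw [pv_excl line i hd]; rfl
      obtain ⟨c, hg, hdc⟩ : ∃ c, line.toList[i]? = some c ∧ PySem.Chars.isdigit c = true := by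
        unfold pvDP at hd
        cases hg : line.toList[i]? with
        | none => rw [hg] at hd; exact absurd hd (by simp)
        | some c => exact ⟨c, rfl, by rw [hg] at hd; exact hd⟩
      have hm : pvM line i = some ((PySem.Int.ofChars? [c]).getD 0) := by
        simp [pvM, hg, hdc]
      rw [List.find?_cons_of_pos hd, List.find?_cons_of_neg (by simp [hwf])]
      simp only [List.filterMap_cons, hm, List.head?_cons]
      cases hW : t.find? (pvWP line) with
      | none => simp [hm]
      | some w =>
        have hiw : i < w := hfor w (List.mem_of_find?_eq_some hW)
        simp [hm, show ¬ (w < i) by omega]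
    · simp only [Bool.not_eq_true] at hd
      by_cases hw : pvWP line i = true
      · obtain ⟨c, hg, hdc⟩ := pv_wp_char line i hw
        obtain ⟨w0, hw0⟩ := Option.isSome_iff_exists.mp hw
        have hm : pvM line i = some ((pvNums.get? w0).getD 0) := by
          simp [pvM, hg, hdc, hw0]
        rw [List.find?_cons_of_neg (by simp [hd]), List.find?_cons_of_pos hw]
        simp only [List.filterMap_cons, hm, List.head?_cons]
        cases hD : t.find? (pvDP line) with
        | none => simp [hm]
        | some d =>
          have hid : i < d := hfor d (List.mem_of_find?_eq_some hD)
          simp [hm, hid]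
      · simp only [Bool.not_eq_true] at hw
        have hm : pvM line i = none := by
          unfold pvM
          cases hg : line.toList[i]? with
          | none => rfl
          | some c =>
            have hdc : PySem.Chars.isdigit c = false := by
              unfold pvDP at hd; rw [hg] at hd; exact hd
            have hAW : pvAW line (↑i) = none := by
              unfold pvWP at hw
              cases hAW : pvAW line (↑i) with
              | none => rfl
              | some w => rw [hAW] at hw; exact absurd hw (by simp)
            simp [hdc, hAW]
        rw [List.find?_cons_of_neg (by simp [hd]), List.find?_cons_of_neg (by simp [hw])]
        simp only [List.filterMap_cons, hm]
        exact ih hpw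

theorem pv_last (line : String) (l : List Nat) (hl : l.Pairwise (· > ·)) :
    (l.filterMap (pvM line)).head? =
      match l.find? (pvDP line), l.find? (pvWP line) with
      | none, none => none
      | some d, none => pvM line d
      | none, some w => pvM line w
      | some d, some w => if w > d then pvM line w else pvM line d := by
  induction l with
  | nil => rfl
  | cons i t ih =>
    have hfor := (List.pairwise_cons.mp hl).1
    have hpw := (List.pairwise_cons.mp hl).2
    by_cases hd : pvDP line i = true
    · have hwf : pvWP line i = false := by
        unfold pvWP; rw [pv_excl line i hd]; rfl
      obtain ⟨c, hg, hdc⟩ : ∃ c, line.toList[i]? = some c ∧ PySem.Chars.isdigit c = true := by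
        unfold pvDP at hd
        cases hg : line.toList[i]? with
        | none => rw [hg] at hd; exact absurd hd (by simp)
        | some c => exact ⟨c, rfl, by rw [hg] at hd; exact hd⟩
      have hm : pvM line i = some ((PySem.Int.ofChars? [c]).getD 0) := by
        simp [pvM, hg, hdc]
      rw [List.find?_cons_of_pos hd, List.find?_cons_of_neg (by simp [hwf])]
      simp only [List.filterMap_cons, hm, List.head?_cons]
      cases hW : t.find? (pvWP line) with
      | none => simp [hm]
      | some w =>
        have hiw : w < i := hfor w (List.mem_of_find?_eq_some hW)
        simp [hm, show ¬ (w > i) by omega]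
    · simp only [Bool.not_eq_true] at hd
      by_cases hw : pvWP line i = true
      · obtain ⟨c, hg, hdc⟩ := pv_wp_char line i hw
        obtain ⟨w0, hw0⟩ := Option.isSome_iff_exists.mp hw
        have hm : pvM line i = some ((pvNums.get? w0).getD 0) := by
          simp [pvM, hg, hdc, hw0]
        rw [List.find?_cons_of_neg (by simp [hd]), List.find?_cons_of_pos hw]
        simp only [List.filterMap_cons, hm, List.head?_cons]
        cases hD : t.find? (pvDP line) with
        | none => simp [hm]
        | some d =>
          have hid : d < i := hfor d (List.mem_of_find?_eq_some hD)
          simp [hm, show i > d by omega]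
      · simp only [Bool.not_eq_true] at hw
        have hm : pvM line i = none := by
          unfold pvM
          cases hg : line.toList[i]? with
          | none => rfl
          | some c =>
            have hdc : PySem.Chars.isdigit c = false := by
              unfold pvDP at hd; rw [hg] at hd; exact hd
            have hAW : pvAW line (↑i) = none := by
              unfold pvWP at hw
              cases hAW : pvAW line (↑i) with
              | none => rfl
              | some w => rw [hAW] at hw; exact absurd hw (by simp)
            simp [hdc, hAW]
        rw [List.find?_cons_of_neg (by simp [hd]), List.find?_cons_of_neg (by simp [hw])]
        simp only [List.filterMap_cons, hm]
        exact ih hpw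

theorem pv_pyGet_neg_one {α : Type} (xs : List α) (h : xs ≠ []) :
    PySem.List.pyGet? xs (-1) = xs.getLast? := by
  have hl : 0 < xs.length := List.length_pos_iff.mpr h
  rw [List.getLast?_eq_getElem?]
  simp [PySem.List.pyGet?, PySem.List.pyIdx?]
  rw [if_pos (by omega : 1 ≤ xs.length)]
  simp

theorem pv_toChars_digit (c : Char) (h : PySem.Chars.isdigit c = true) :
    PySem.Int.toChars ((PySem.Int.ofChars? [c]).getD 0) = [c] := by
  rcases pv_digit_cases c h with h|h|h|h|h|h|h|h|h|h <;> subst h <;> decide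

theorem pv_pair (f l : Int) (hf0 : 0 ≤ f) (hf9 : f ≤ 9) (hl0 : 0 ≤ l) (hl9 : l ≤ 9) :
    (PySem.Int.ofChars? (PySem.Int.toChars f ++ PySem.Int.toChars l)).getD 0 = f * 10 + l := by
  interval_cases f <;> interval_cases l <;> decide

theorem pv_pyRange_range (n : Nat) :
    PySem.List.pyRange 0 (↑n) 1 = List.map (fun (k : Nat) => (k : Int)) (List.range n) := by
  have h3 : (((n : Int)) - 0).toNat = n := by omega
  rw [PySem.List.pyRange_one, h3]
  apply List.map_congr_left
  intro k _
  omega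
theorem pv_enum_eq (cs : List Char) :
    PySem.List.enumerate cs 0 =
      List.map (fun (k : Nat) => ((k : Int), cs.getD k 'x')) (List.range cs.length) := by
  rw [PySem.List.enumerate_eq_map_pyRange cs 'x']
  have h : PySem.List.len cs = ((cs.length : Nat) : Int) := by simp [PySem.List.len]
  rw [h, pv_pyRange_range, List.map_map]
  apply List.map_congr_left
  intro k hk
  simp [Function.comp, PySem.List.pyGetD_natCast]


theorem pv_A_fd (line : String) (d : Int) :
    pvFdLoop (PySem.List.enumerate line.toList 0) d =
      match (List.range line.toList.length).find? (pvDP line) with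
      | some k => (k : Int) | none => d := by
  rw [pvFdLoop_eq, pv_enum_eq, List.find?_map]
  have hc : ((List.range line.toList.length).find?
      ((fun p => PySem.Chars.isdigit p.2) ∘ (fun (k : Nat) => ((k : Int), line.toList.getD k 'x')))) =
      (List.range line.toList.length).find? (pvDP line) := by
    apply pv_find?_congr
    intro k hk
    have hk' : k < line.toList.length := List.mem_range.mp hk
    simp [Function.comp, pvDP, List.getElem?_eq_getElem hk']
  rw [hc]
  cases (List.range line.toList.length).find? (pvDP line) <;> simp

theorem pv_A_ld (line : String) (d : Int) :
    pvLdLoop (PySem.List.enumerate line.toList 0) d =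
      match (List.range line.toList.length).reverse.find? (pvDP line) with
      | some k => (k : Int) | none => d := by
  rw [pvLdLoop_eq, pv_enum_eq, ← List.map_reverse, List.find?_map]
  have hc : (((List.range line.toList.length).reverse).find?
      ((fun p => PySem.Chars.isdigit p.2) ∘ (fun (k : Nat) => ((k : Int), line.toList.getD k 'x')))) =
      ((List.range line.toList.length).reverse).find? (pvDP line) := by
    apply pv_find?_congr
    intro k hk
    have hk' : k < line.toList.length := List.mem_range.mp (List.mem_reverse.mp hk)
    simp [Function.comp, pvDP, List.getElem?_eq_getElem hk']
  rw [hc]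
  cases ((List.range line.toList.length).reverse).find? (pvDP line) <;> simp

theorem pv_A_fw (line : String) (acc : Int × String) :
    pvFwLoop line (PySem.List.pyRange 0 (PySem.Str.len line) 1) acc =
      match (List.range line.toList.length).find? (pvWP line) with
      | some k => ((k : Int), (pvAW line (↑k)).getD "") | none => acc := by
  rw [PySem.Str.len_eq, pv_pyRange_range, pvFwLoop_eq, List.find?_map]
  have hc : ((List.range line.toList.length).find?
      ((fun i => (pvAW line i).isSome) ∘ (fun (k : Nat) => (k : Int)))) =
      (List.range line.toList.length).find? (pvWP line) := by
    apply pv_find?_congr; intro k _; rfl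
  rw [hc]
  cases (List.range line.toList.length).find? (pvWP line) <;> simp

theorem pv_shrink (line : String) :
    (List.range (line.toList.length - 2)).reverse.find? (pvWP line) =
      (List.range line.toList.length).reverse.find? (pvWP line) := by
  by_cases h : 2 ≤ line.toList.length
  · have e : line.toList.length - 2 + 2 = line.toList.length := by omega
    have hsplit : List.range line.toList.length =
        List.range' 0 (line.toList.length - 2) ++ List.range' (line.toList.length - 2) 2 := by
      rw [List.range_eq_range', ← e, ← List.range'_append]
      norm_num
    rw [hsplit, List.reverse_append, List.find?_append]
    have hnone : (List.range' (line.toList.length - 2) 2).reverse.find? (pvWP line) = none := by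
      apply List.find?_eq_none.mpr
      intro k hk
      have hb := List.mem_range'_1.mp (List.mem_reverse.mp hk)
      simp [pvWP, pv_aw_none line k (by omega)]
    rw [hnone, Option.none_or, List.range_eq_range']
  · have h0 : line.toList.length - 2 = 0 := by omega
    rw [h0]
    simp only [List.range_zero, List.reverse_nil, List.find?_nil]
    symm
    apply List.find?_eq_none.mpr
    intro k hk
    have hb : k < line.toList.length := List.mem_range.mp (List.mem_reverse.mp hk)
    simp [pvWP, pv_aw_none line k (by omega)]

theorem pv_A_lw (line : String) (acc : Int × String) :
    pvLwLoop line
      (PySem.List.pyRange 0 (PySem.Str.len (PySem.Str.slice line none (some (-2)))) 1) acc =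
      match (List.range line.toList.length).reverse.find? (pvWP line) with
      | some k => ((k : Int), (pvAW line (↑k)).getD "") | none => acc := by
  have hlen2 : PySem.Str.len (PySem.Str.slice line none (some (-2))) =
      ((line.toList.length - 2 : Nat) : Int) := by
    rw [PySem.Str.len_eq]
    congr 1
    rw [PySem.Str.toList_slice, PySem.Chars.slice_eq_listSlice,
        PySem.List.slice_to_neg_ofNat line.toList 2 (by norm_num)]
    rw [List.length_take]
    omega
  rw [hlen2, pv_pyRange_range]
  rw [pvLwLoop_eq line _ (by intro i hi; obtain ⟨k, _, rfl⟩ := List.mem_map.mp hi; exact Int.natCast_nonneg k) acc]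
  rw [← List.map_reverse, List.find?_map]
  have hc : (((List.range (line.toList.length - 2)).reverse).find?
      ((fun i => (pvAW line i).isSome) ∘ (fun (k : Nat) => (k : Int)))) =
      ((List.range (line.toList.length - 2)).reverse).find? (pvWP line) := by
    apply pv_find?_congr; intro k _; rfl
  rw [hc, pv_shrink]
  cases ((List.range line.toList.length).reverse).find? (pvWP line) <;> simp

theorem pv_B_vals (line : String) :
    pvValsLoop line (PySem.List.enumerate line.toList 0) [] =
      (List.range line.toList.length).filterMap (pvM line) := by
  have h := pvValsLoop_eq line line.toList.length 0 [] (by omega)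
  simp only [List.drop_zero, Nat.cast_zero] at h
  rw [h, List.range_eq_range']
  simp

theorem pv_wp_of_seg (line : String) (j m : Nat) (w : String)
    (hm : m = 3 ∨ m = 4 ∨ m = 5) (hw : pvInNums w = true)
    (hseg : (pvSliceA line (↑j) (↑m)).toList = w.toList) : pvWP line j = true := by
  have hs : pvSliceA line (↑j) (↑m) = w := String.toList_inj.mp hseg
  rcases hm with rfl|rfl|rfl
  · have hknown : pvInNums (pvSliceA line (↑j) 3) = true := by
      rw [show (3:Int) = ((3:Nat):Int) by norm_num, hs]; exact hw
    unfold pvWP pvAW; split_ifs <;> simp_all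
  · have hknown : pvInNums (pvSliceA line (↑j) 4) = true := by
      rw [show (4:Int) = ((4:Nat):Int) by norm_num, hs]; exact hw
    unfold pvWP pvAW; split_ifs <;> simp_all
  · have hknown : pvInNums (pvSliceA line (↑j) 5) = true := by
      rw [show (5:Int) = ((5:Nat):Int) by norm_num, hs]; exact hw
    unfold pvWP pvAW; split_ifs <;> simp_all

theorem pv_pre (line : String) (hPre : Pre_part2 line) :
    ((List.range line.toList.length).find? (pvDP line)).isSome = true ∨
    ((List.range line.toList.length).find? (pvWP line)).isSome = true := by
  rcases hPre with hd | ⟨w, hwmem, hIn⟩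
  · left
    obtain ⟨c, hc, hdc⟩ := List.any_eq_true.mp hd
    obtain ⟨k, hk, hkc⟩ := List.mem_iff_getElem.mp hc
    exact List.find?_isSome.mpr ⟨k, List.mem_range.mpr hk,
      by unfold pvDP; rw [List.getElem?_eq_getElem hk, hkc]; exact hdc⟩
  · right
    rw [PySem.Str.isIn_iff_infix] at hIn
    obtain ⟨s, t, hst⟩ := hIn
    have hdrop : line.toList.drop s.length = w.toList ++ t := by
      rw [← hst, List.append_assoc, List.drop_left]
    have hseg : (pvSliceA line (↑s.length) (↑w.toList.length)).toList = w.toList := by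
      rw [pv_slice_toList, hdrop, List.take_left]
    have hw : pvInNums w = true := by fin_cases hwmem <;> decide
    have hm : w.toList.length = 3 ∨ w.toList.length = 4 ∨ w.toList.length = 5 := by
      fin_cases hwmem <;> simp
    have hwp := pv_wp_of_seg line s.length w.toList.length w hm hw hseg
    have hlt := pv_wp_lt line s.length hwp
    exact List.find?_isSome.mpr ⟨s.length, List.mem_range.mpr (by omega), hwp⟩

-- ===== VERDICT (by name: the statement is the Claim_ definition above) =====
theorem pv_finish (line : String) (f l : Int)
    (hf : ((List.range line.toList.length).filterMap (pvM line)).head? = some f)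
    (hl : ((List.range line.toList.length).filterMap (pvM line)).getLast? = some l) :
    (PySem.Int.ofChars? (PySem.Int.toChars f ++ PySem.Int.toChars l)).getD 0 =
      (PySem.List.pyGet? ((List.range line.toList.length).filterMap (pvM line)) 0).getD 0 * 10 +
      (PySem.List.pyGet? ((List.range line.toList.length).filterMap (pvM line)) (-1)).getD 0 := by
  obtain ⟨kf, _, hMf⟩ := List.mem_filterMap.mp (List.mem_of_mem_head? hf)
  obtain ⟨kl, _, hMl⟩ := List.mem_filterMap.mp (List.mem_of_getLast? hl)
  obtain ⟨hf0, hf9⟩ := pv_m_bounds line kf f hMf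
  obtain ⟨hl0, hl9⟩ := pv_m_bounds line kl l hMl
  have hne : (List.range line.toList.length).filterMap (pvM line) ≠ [] := by
    intro h0; rw [h0] at hf; simp at hf
  have hz : PySem.List.pyGet? ((List.range line.toList.length).filterMap (pvM line)) 0 = some f := by
    rw [show (0:Int) = ((0:Nat):Int) from rfl, PySem.List.pyGet?_natCast,
        ← List.head?_eq_getElem?]
    exact hf
  have hm1 : PySem.List.pyGet? ((List.range line.toList.length).filterMap (pvM line)) (-1) = some l := by
    rw [pv_pyGet_neg_one _ hne]; exact hl
  rw [hz, hm1, pv_pair f l hf0 hf9 hl0 hl9]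
  rfl

theorem part2_spec : Claim_equal_part2 := by
  intro line _ hPre
  unfold Spec_part2
  have hpair := pv_pre line hPre
  have hhead := pv_head line (List.range line.toList.length) List.pairwise_lt_range
  have hlast := pv_last line (List.range line.toList.length).reverse
    (List.pairwise_reverse.mpr (by simpa using List.pairwise_lt_range))
  have hLD : ∀ p : Nat → Bool,
      (List.find? p (List.range line.toList.length).reverse).isSome =
      (List.find? p (List.range line.toList.length)).isSome := by
    intro p; rw [Bool.eq_iff_iff]; simp only [List.find?_isSome]; simp
  have hwordM : ∀ k : Nat, pvWP line k = true →
      ∃ w0, pvAW line (↑k) = some w0 ∧ pvM line k = some ((pvNums.get? w0).getD 0) := by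
    intro k hk
    obtain ⟨c, hg, hdc⟩ := pv_wp_char line k hk
    unfold pvWP at hk
    obtain ⟨w0, hw0⟩ := Option.isSome_iff_exists.mp hk
    exact ⟨w0, hw0, by simp [pvM, hg, hdc, hw0]⟩
  have hdigM : ∀ k : Nat, pvDP line k = true →
      ∃ c, line.toList[k]? = some c ∧ PySem.Chars.isdigit c = true ∧
        pvM line k = some ((PySem.Int.ofChars? [c]).getD 0) := by
    intro k hk
    unfold pvDP at hk
    cases hg : line.toList[k]? with
    | none => rw [hg] at hk; exact absurd hk (by simp)
    | some c =>
      have hdc : PySem.Chars.isdigit c = true := by rw [hg] at hk; exact hk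
      exact ⟨c, rfl, hdc, by simp [pvM, hg, hdc]⟩
  simp only [part2, part2_alt]
  rw [pv_A_fd, pv_A_ld, pv_A_fw, pv_A_lw, pv_B_vals]
  rcases hD : List.find? (pvDP line) (List.range line.toList.length) with _ | d <;>
    rcases hW : List.find? (pvWP line) (List.range line.toList.length) with _ | w
  · -- no digit, no word: excluded by Pre_
    exfalso; rw [hD, hW] at hpair; simp at hpair
  · -- word only
    have hRD : List.find? (pvDP line) (List.range line.toList.length).reverse = none := by
      have h := hLD (pvDP line); rw [hD] at h
      cases hc : List.find? (pvDP line) (List.range line.toList.length).reverse with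
      | none => rfl
      | some x => rw [hc] at h; simp at h
    have hRWs : (List.find? (pvWP line) (List.range line.toList.length).reverse).isSome = true := by
      rw [hLD, hW]; rfl
    obtain ⟨w', hRW⟩ := Option.isSome_iff_exists.mp hRWs
    rw [hD, hW] at hhead
    rw [hRD, hRW] at hlast ⊢
    obtain ⟨w0, hAW, hMw⟩ := hwordM w (List.find?_some hW)
    obtain ⟨w0', hAW', hMw'⟩ := hwordM w' (List.find?_some hRW)
    have hwlt : w + 3 ≤ line.toList.length := pv_wp_lt line w (List.find?_some hW)
    simp only [PySem.Str.len_eq] at *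
    simp only [hAW, hAW', Option.getD_some]
    rw [if_pos (show ((w : Nat) : Int) < ((line.toList.length : Nat) : Int) by omega),
        if_pos (show ((w' : Nat) : Int) > -1 by omega)]
    rw [hMw] at hhead
    rw [hMw'] at hlast
    have hgl : (List.filterMap (pvM line) (List.range line.toList.length)).getLast? =
        some ((pvNums.get? w0').getD 0) := by
      rw [← List.head?_reverse, ← List.filterMap_reverse]; exact hlast
    exact pv_finish line _ _ hhead hgl
  · -- digit only
    have hRW : List.find? (pvWP line) (List.range line.toList.length).reverse = none := by
      have h := hLD (pvWP line); rw [hW] at h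
      cases hc : List.find? (pvWP line) (List.range line.toList.length).reverse with
      | none => rfl
      | some x => rw [hc] at h; simp at h
    have hRDs : (List.find? (pvDP line) (List.range line.toList.length).reverse).isSome = true := by
      rw [hLD, hD]; rfl
    obtain ⟨d', hRD⟩ := Option.isSome_iff_exists.mp hRDs
    rw [hD, hW] at hhead
    rw [hRD, hRW] at hlast ⊢
    obtain ⟨c, hg, hdc, hMd⟩ := hdigM d (List.find?_some hD)
    obtain ⟨c', hg', hdc', hMd'⟩ := hdigM d' (List.find?_some hRD)
    have hdlt : d < line.toList.length := List.mem_range.mp (List.mem_of_find?_eq_some hD)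
    have hdlt' : d' < line.toList.length :=
      List.mem_range.mp (List.mem_reverse.mp (List.mem_of_find?_eq_some hRD))
    simp only [PySem.Str.len_eq] at *
    rw [if_neg (show ¬ ((line.toList.length : Nat) : Int) < ((d : Nat) : Int) by omega),
        if_neg (show ¬ (-1 : Int) > ((d' : Nat) : Int) by omega),
        PySem.Str.pyGet?_natCast, PySem.Str.pyGet?_natCast]
    simp only [hg, hg']
    rw [show [c] = PySem.Int.toChars ((PySem.Int.ofChars? [c]).getD 0) from
          (pv_toChars_digit c hdc).symm,
        show [c'] = PySem.Int.toChars ((PySem.Int.ofChars? [c']).getD 0) from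
          (pv_toChars_digit c' hdc').symm]
    rw [hMd] at hhead
    rw [hMd'] at hlast
    have hgl : (List.filterMap (pvM line) (List.range line.toList.length)).getLast? =
        some ((PySem.Int.ofChars? [c']).getD 0) := by
      rw [← List.head?_reverse, ← List.filterMap_reverse]; exact hlast
    exact pv_finish line _ _ hhead hgl
  · -- both a digit and a word somewhere
    have hRDs : (List.find? (pvDP line) (List.range line.toList.length).reverse).isSome = true := by
      rw [hLD, hD]; rfl
    have hRWs : (List.find? (pvWP line) (List.range line.toList.length).reverse).isSome = true := by
      rw [hLD, hW]; rfl
    obtain ⟨d', hRD⟩ := Option.isSome_iff_exists.mp hRDs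
    obtain ⟨w', hRW⟩ := Option.isSome_iff_exists.mp hRWs
    rw [hD, hW] at hhead
    rw [hRD, hRW] at hlast ⊢
    have hdp := List.find?_some hD
    have hwp := List.find?_some hW
    have hdp' := List.find?_some hRD
    have hwp' := List.find?_some hRW
    obtain ⟨c, hg, hdc, hMd⟩ := hdigM d hdp
    obtain ⟨c', hg', hdc', hMd'⟩ := hdigM d' hdp'
    obtain ⟨w0, hAW, hMw⟩ := hwordM w hwp
    obtain ⟨w0', hAW', hMw'⟩ := hwordM w' hwp'
    have hdlt : d < line.toList.length := List.mem_range.mp (List.mem_of_find?_eq_some hD)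
    have hdlt' : d' < line.toList.length :=
      List.mem_range.mp (List.mem_reverse.mp (List.mem_of_find?_eq_some hRD))
    have hne : d ≠ w := by
      intro h; subst h
      unfold pvWP at hwp; rw [pv_excl line d hdp] at hwp; simp at hwp
    have hne' : d' ≠ w' := by
      intro h; subst h
      unfold pvWP at hwp'; rw [pv_excl line d' hdp'] at hwp'; simp at hwp'
    simp only [hAW, hAW', Option.getD_some] at *
    by_cases hcmp : w < d
    · rw [if_pos (show ((w : Nat) : Int) < ((d : Nat) : Int) by omega)]
      rw [if_pos hcmp] at hhead
      rw [hMw] at hhead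
      by_cases hcmp' : w' > d'
      · rw [if_pos (show ((w' : Nat) : Int) > ((d' : Nat) : Int) by omega)]
        rw [if_pos hcmp'] at hlast
        rw [hMw'] at hlast
        have hgl : (List.filterMap (pvM line) (List.range line.toList.length)).getLast? =
            some ((pvNums.get? w0').getD 0) := by
          rw [← List.head?_reverse, ← List.filterMap_reverse]; exact hlast
        exact pv_finish line _ _ hhead hgl
      · rw [if_neg (show ¬ ((w' : Nat) : Int) > ((d' : Nat) : Int) by omega)]
        rw [if_neg hcmp'] at hlast
        rw [hMd'] at hlast
        rw [PySem.Str.pyGet?_natCast]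
        simp only [hg']
        rw [show [c'] = PySem.Int.toChars ((PySem.Int.ofChars? [c']).getD 0) from
              (pv_toChars_digit c' hdc').symm]
        have hgl : (List.filterMap (pvM line) (List.range line.toList.length)).getLast? =
            some ((PySem.Int.ofChars? [c']).getD 0) := by
          rw [← List.head?_reverse, ← List.filterMap_reverse]; exact hlast
        exact pv_finish line _ _ hhead hgl
    · rw [if_neg (show ¬ ((w : Nat) : Int) < ((d : Nat) : Int) by omega)]
      rw [if_neg hcmp] at hhead
      rw [hMd] at hhead
      rw [PySem.Str.pyGet?_natCast]
      simp only [hg]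
      rw [show [c] = PySem.Int.toChars ((PySem.Int.ofChars? [c]).getD 0) from
            (pv_toChars_digit c hdc).symm]
      by_cases hcmp' : w' > d'
      · rw [if_pos (show ((w' : Nat) : Int) > ((d' : Nat) : Int) by omega)]
        rw [if_pos hcmp'] at hlast
        rw [hMw'] at hlast
        have hgl : (List.filterMap (pvM line) (List.range line.toList.length)).getLast? =
            some ((pvNums.get? w0').getD 0) := by
          rw [← List.head?_reverse, ← List.filterMap_reverse]; exact hlast
        exact pv_finish line _ _ hhead hgl
      · rw [if_neg (show ¬ ((w' : Nat) : Int) > ((d' : Nat) : Int) by omega)]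
        rw [if_neg hcmp'] at hlast
        rw [hMd'] at hlast
        rw [PySem.Str.pyGet?_natCast]
        simp only [hg']
        rw [show [c'] = PySem.Int.toChars ((PySem.Int.ofChars? [c']).getD 0) from
              (pv_toChars_digit c' hdc').symm]
        have hgl : (List.filterMap (pvM line) (List.range line.toList.length)).getLast? =
            some ((PySem.Int.ofChars? [c']).getD 0) := by
          rw [← List.head?_reverse, ← List.filterMap_reverse]; exact hlast
        exact pv_finish line _ _ hhead hgl
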